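-- pv_equiv track=rewrite | github.com/manisandy2/orchestrator | app/utility/validators.py | validate_completeness
-- ===== SOURCE A (Python) =====
-- def validate_completeness(reply: str, issues: list) -> bool:
--     if not reply:
--         return False
--
--     # If no issues → it's okay to be generic
--     if not issues:
--         return True
--
--     text = reply.lower()
--
--     # Normalize issues (handle phrases)
--     normalized_issues = [issue.lower().strip() for issue in issues if issue]
--
--     # Check if at least one issue is referenced
--     for issue in normalized_issues:
--         # handle partial match (e.g., "staff behavior" → "staff")
--         words = issue.split()
--         if any(word in text for word in words):
--             return True
--
--     return False
-- ===== SOURCE B (Python) =====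
-- import re
--
--
-- def validate_completeness(reply: str, issues: list) -> bool:
--     if not reply:
--         return False
--     if not issues:
--         return True
--     words = [w for issue in issues if issue for w in issue.lower().strip().split()]
--     if not words:
--         return False
--     pattern = "|".join(map(re.escape, words))
--     return re.search(pattern, reply.lower()) is not None
-- ===== Notes on version B (the rewrite author's own statement) =====
-- stated objective: idiomatic
-- what changed: Flattens all issue words into one list and matches them with a single regex alternation ('|'.join(re.escape(w)) + re.search) over the lowered reply, instead of A's per-issue loop doing a separate 'word in text' substring scan for every word.
import Mathlib
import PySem

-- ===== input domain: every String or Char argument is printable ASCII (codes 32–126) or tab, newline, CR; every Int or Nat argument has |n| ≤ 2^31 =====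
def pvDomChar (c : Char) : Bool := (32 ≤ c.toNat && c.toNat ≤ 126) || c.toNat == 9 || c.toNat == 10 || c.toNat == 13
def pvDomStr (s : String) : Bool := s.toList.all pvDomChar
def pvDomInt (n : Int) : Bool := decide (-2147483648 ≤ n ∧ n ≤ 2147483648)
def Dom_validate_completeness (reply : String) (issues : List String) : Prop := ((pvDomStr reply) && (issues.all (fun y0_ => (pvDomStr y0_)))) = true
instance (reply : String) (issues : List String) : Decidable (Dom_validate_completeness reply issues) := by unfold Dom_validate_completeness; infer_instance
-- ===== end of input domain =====

-- B flattens all issue words once and matches them with a single regex alternation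
-- (re.search over '|'.join(re.escape(w))) instead of A's per-issue loop with a separate
-- substring scan per word ("idiomatic": a different matching representation, not claimed faster).

-- ===== PORT A =====
def validate_completeness (reply : String) (issues : List String) : Bool :=
  if reply = "" then false
  else if issues = [] then true
  else
    let text := PySem.Str.lower reply
    let normalized_issues :=
      (issues.filter (fun issue => !(issue = ""))).map
        (fun issue => PySem.Str.strip (PySem.Str.lower issue))
    normalized_issues.any (fun issue =>
      (PySem.Str.split₀ issue).any (fun word => PySem.Str.isIn word text))

-- ===== PORT B =====
-- Hand port of the two re calls (exact on this use: a pattern that is a '|'-join of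
-- re.escape'd literals).  re.escape (CPython ≥3.7) backslash-escapes exactly the special
-- characters b'()[]{}?*+-|^$\\.&~# \t\n\r\v\f'; re.search of an alternation of escaped
-- literals matches iff some alternative occurs as a substring of the text.
def pvReSpecial (c : Char) : Bool :=
  ("()[]{}?*+-|^$\\.&~# \t\n\r".toList ++ [Char.ofNat 11, Char.ofNat 12]).contains c

def reEscapeChar (c : Char) : List Char := if pvReSpecial c then ['\\', c] else [c]

-- re.escape
def reEscape (w : List Char) : List Char := w.flatMap reEscapeChar

-- split the pattern at its top-level '|' (a backslash escapes the next character)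
def splitAltsGo : List Char → List Char → List (List Char)
  | [], acc => [acc.reverse]
  | '\\' :: c :: rest, acc => splitAltsGo rest (c :: '\\' :: acc)
  | '|' :: rest, acc => acc.reverse :: splitAltsGo rest []
  | c :: rest, acc => splitAltsGo rest (c :: acc)

-- undo the escaping: each alternative is a literal
def unesc : List Char → List Char
  | [] => []
  | '\\' :: c :: rest => c :: unesc rest
  | c :: rest => c :: unesc rest

-- re.search(pat, text) is not None, for pat an alternation of escaped literals
def reSearchAlt (pat text : List Char) : Bool :=
  (List.range (text.length + 1)).any (fun i =>
    ((splitAltsGo pat []).map unesc).any (fun a => a.isPrefixOf (text.drop i)))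

def validate_completeness_alt (reply : String) (issues : List String) : Bool :=
  if reply = "" then false
  else if issues = [] then true
  else
    let words :=
      (issues.filter (fun issue => !(issue = ""))).flatMap
        (fun issue => PySem.Str.split₀ (PySem.Str.strip (PySem.Str.lower issue)))
    if words = [] then false
    else
      let pattern := PySem.Chars.join ['|'] (words.map (fun w => reEscape w.toList))
      reSearchAlt pattern (PySem.Str.lower reply).toList

-- ===== PRECONDITION & SPEC =====
def Spec_validate_completeness (reply : String) (issues : List String) (out : Bool) : Prop := out = validate_completeness_alt reply issues
instance (reply : String) (issues : List String) (out : Bool) : Decidable (Spec_validate_completeness reply issues out) := by unfold Spec_validate_completeness; infer_instance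

-- ===== CLAIM =====
def Claim_equal_validate_completeness : Prop := ∀ (reply : String) (issues : List String), Dom_validate_completeness reply issues → Spec_validate_completeness reply issues (validate_completeness reply issues)

-- ===== LEMMAS AND PROOFS =====

theorem splitAltsGo_esc (c : Char) (rest acc : List Char) :
    splitAltsGo ('\\' :: c :: rest) acc = splitAltsGo rest (c :: '\\' :: acc) := rfl

theorem splitAltsGo_bar (rest acc : List Char) :
    splitAltsGo ('|' :: rest) acc = acc.reverse :: splitAltsGo rest [] := rfl

theorem splitAltsGo_other (c : Char) (rest acc : List Char)
    (h1 : c ≠ '\\') (h2 : c ≠ '|') :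
    splitAltsGo (c :: rest) acc = splitAltsGo rest (c :: acc) := by
  conv_lhs => rw [splitAltsGo.eq_def]
  split <;> simp_all

theorem unesc_esc (c : Char) (rest : List Char) :
    unesc ('\\' :: c :: rest) = c :: unesc rest := rfl

theorem unesc_other (c : Char) (rest : List Char) (h : c ≠ '\\') :
    unesc (c :: rest) = c :: unesc rest := by
  conv_lhs => rw [unesc.eq_def]
  split <;> simp_all

theorem unesc_reEscape (w : List Char) : unesc (reEscape w) = w := by
  induction w with
  | nil => rfl
  | cons c w ih =>
    by_cases hc : pvReSpecial c
    · have hE : reEscape (c :: w) = '\\' :: c :: reEscape w := by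
        simp [reEscape, reEscapeChar, hc]
      rw [hE, unesc_esc, ih]
    · have hc' : pvReSpecial c = false := by simpa using hc
      have hne : c ≠ '\\' := by intro h; subst h; exact absurd hc' (by decide)
      have hE : reEscape (c :: w) = c :: reEscape w := by
        simp [reEscape, reEscapeChar, hc']
      rw [hE, unesc_other c _ hne, ih]

theorem splitAltsGo_reEscape (w : List Char) (rest acc : List Char) :
    splitAltsGo (reEscape w ++ rest) acc
      = splitAltsGo rest ((reEscape w).reverse ++ acc) := by
  induction w generalizing acc with
  | nil => simp [reEscape]
  | cons c w ih =>
    by_cases hc : pvReSpecial c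
    · have hE : reEscape (c :: w) = '\\' :: c :: reEscape w := by
        simp [reEscape, reEscapeChar, hc]
      rw [hE]
      simp only [List.cons_append]
      rw [splitAltsGo_esc, ih]
      congr 1
      simp
    · have hc' : pvReSpecial c = false := by simpa using hc
      have h1 : c ≠ '\\' := by intro h; subst h; exact absurd hc' (by decide)
      have h2 : c ≠ '|' := by intro h; subst h; exact absurd hc' (by decide)
      have hE : reEscape (c :: w) = c :: reEscape w := by
        simp [reEscape, reEscapeChar, hc']
      rw [hE]
      simp only [List.cons_append]
      rw [splitAltsGo_other c _ _ h1 h2, ih]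
      congr 1
      simp

theorem pv_intercalate_singleton (sep a : List Char) : List.intercalate sep [a] = a := by
  simp [List.intercalate]

theorem pv_intercalate_cons_cons (sep a b : List Char) (l : List (List Char)) :
    List.intercalate sep (a :: b :: l) = a ++ sep ++ List.intercalate sep (b :: l) := by
  simp [List.intercalate, List.intersperse]

theorem splitAlts_join (ws : List (List Char)) (hne : ws ≠ []) :
    splitAltsGo (PySem.Chars.join ['|'] (ws.map reEscape)) [] = ws.map reEscape := by
  unfold PySem.Chars.join
  induction ws with
  | nil => exact absurd rfl hne
  | cons w ws ih =>
    cases ws with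
    | nil =>
      rw [List.map_singleton, pv_intercalate_singleton]
      have h := splitAltsGo_reEscape w [] []
      simp only [List.append_nil] at h
      simp [h, splitAltsGo]
    | cons w2 ws2 =>
      have hrec := ih (by simp)
      rw [List.map_cons, List.map_cons, pv_intercalate_cons_cons]
      rw [List.append_assoc, splitAltsGo_reEscape, List.singleton_append,
        splitAltsGo_bar]
      rw [List.append_nil, List.reverse_reverse]
      simpa using hrec

theorem infix_iff_range (sub s : List Char) :
    PySem.Chars.isIn sub s = true
      ↔ ∃ i ∈ List.range (s.length + 1), sub.isPrefixOf (s.drop i) = true := by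
  rw [PySem.Chars.isIn_iff_infix]
  constructor
  · rintro ⟨l, r, rfl⟩
    refine ⟨l.length, by simp, ?_⟩
    rw [List.isPrefixOf_iff_prefix]
    simp
  · rintro ⟨i, _, hp⟩
    rw [List.isPrefixOf_iff_prefix] at hp
    exact hp.isInfix.trans (List.drop_suffix _ _).isInfix

theorem any_isIn_eq_reSearchAlt (ws : List String) (t : String) (h : ws ≠ []) :
    ws.any (fun w => PySem.Str.isIn w t)
      = reSearchAlt (PySem.Chars.join ['|'] (ws.map (fun w => reEscape w.toList))) t.toList := by
  unfold reSearchAlt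
  have h1 : ws.map (fun w => reEscape w.toList) = (ws.map String.toList).map reEscape := by
    simp [List.map_map, Function.comp]
  have halts : (splitAltsGo (PySem.Chars.join ['|'] (ws.map (fun w => reEscape w.toList))) []).map unesc
      = ws.map String.toList := by
    rw [h1, splitAlts_join _ (by simpa using h), List.map_map]
    simp [Function.comp, unesc_reEscape]
  rw [halts, Bool.eq_iff_iff]
  simp only [List.any_eq_true, List.mem_map, List.mem_range]
  constructor
  · rintro ⟨w, hwmem, hin⟩
    have hin' : PySem.Chars.isIn w.toList t.toList = true := by simpa using hin
    obtain ⟨i, hi, hp⟩ := (infix_iff_range _ _).1 hin'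
    exact ⟨i, by simpa using hi, w.toList, ⟨w, hwmem, rfl⟩, hp⟩
  · rintro ⟨i, hi, a, ⟨w, hwmem, rfl⟩, hp⟩
    refine ⟨w, hwmem, ?_⟩
    have := (infix_iff_range w.toList t.toList).2 ⟨i, by simpa using hi, hp⟩
    simpa using this

theorem validate_completeness_eq (reply : String) (issues : List String) :
    validate_completeness reply issues = validate_completeness_alt reply issues := by
  unfold validate_completeness validate_completeness_alt
  by_cases h1 : reply = ""
  · simp [h1]
  · by_cases h2 : issues = []
    · simp [h1, h2]
    · simp only [h1, h2, if_false]
      rw [List.any_map]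
      simp only [Function.comp_def]
      rw [← List.any_flatMap]
      by_cases hwnil :
          (issues.filter (fun issue => !(issue = ""))).flatMap
            (fun issue => PySem.Str.split₀ (PySem.Str.strip (PySem.Str.lower issue))) = []
      · rw [hwnil]
        simp
      · rw [if_neg hwnil]
        exact any_isIn_eq_reSearchAlt _ _ hwnil

-- ===== VERDICT =====
theorem validate_completeness_spec : Claim_equal_validate_completeness := by
  intro reply issues _
  unfold Spec_validate_completeness
  exact validate_completeness_eq reply issues
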